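-- pv_equiv track=rewrite | github.com/helpingstar/algorithmstudy | python/Solved_Problem/BOJ_17140.py | cal_r
-- ===== SOURCE A (Python) =====
-- def cal_r(board):
--     br, bc = len(board), len(board[0])
--     new_dic_list = []
--     l_max = 0
--     for r in range(br):
--         n_dic = dict()
--         for c in range(bc):
--             if board[r][c] == 0:
--                 continue
--             if board[r][c] not in n_dic:
--                 n_dic[board[r][c]] = 1
--             else:
--                 n_dic[board[r][c]] += 1
--         new_dic_list.append(n_dic)
--         l_max = max(l_max, len(n_dic))
--     l_max = min(50, l_max)
--     new_board = [[0] * (l_max*2) for _ in range(br)]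
--
--     for r in range(br):
--         now_dic = new_dic_list[r]
--         for i, (k, v) in enumerate(sorted(now_dic.items(), key=lambda x: (x[1], x[0]))):
--             if i == 50:
--                 break
--             new_board[r][i*2] = k
--             new_board[r][i*2+1] = v
--     return new_board
-- ===== SOURCE B (Python) =====
-- def cal_r(board):
--     bc = len(board[0])
--     rows = [flat_row(row[:bc]) for row in board]
--     width = max(len(fr) for fr in rows)
--     return [fr + [0] * (width - len(fr)) for fr in rows]
--
--
-- def rle(xs):
--     """Run-length encode a list whose equal elements are adjacent."""
--     if not xs:
--         return []
--     i = 1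
--     while i < len(xs) and xs[i] == xs[0]:
--         i += 1
--     return [(xs[0], i)] + rle(xs[i:])
--
--
-- def flat_row(cells):
--     pairs = rle(sorted(x for x in cells if x != 0))
--     pairs.sort(key=lambda p: (p[1], p[0]))
--     return [n for p in pairs[:50] for n in p]
-- ===== Notes on version B (the rewrite author's own statement) =====
-- stated objective: alternative
-- what changed: B groups each row's nonzero values by sorting them and run-length-encoding the sorted runs (no dict/counter at all), then sorts the (value,count) pairs by (count,value), and derives the output width from the built ragged rows in a second pass instead of A's precomputed capped l_max with a preallocated board written by index.
-- outside the precondition, e.g. on cal_r([]): A raises IndexError, B raises IndexError; on cal_r([[1, 2], []]): A raises IndexError, B returns [[1, 1, 2, 1], [0, 0, 0, 0]]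
import Mathlib
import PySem

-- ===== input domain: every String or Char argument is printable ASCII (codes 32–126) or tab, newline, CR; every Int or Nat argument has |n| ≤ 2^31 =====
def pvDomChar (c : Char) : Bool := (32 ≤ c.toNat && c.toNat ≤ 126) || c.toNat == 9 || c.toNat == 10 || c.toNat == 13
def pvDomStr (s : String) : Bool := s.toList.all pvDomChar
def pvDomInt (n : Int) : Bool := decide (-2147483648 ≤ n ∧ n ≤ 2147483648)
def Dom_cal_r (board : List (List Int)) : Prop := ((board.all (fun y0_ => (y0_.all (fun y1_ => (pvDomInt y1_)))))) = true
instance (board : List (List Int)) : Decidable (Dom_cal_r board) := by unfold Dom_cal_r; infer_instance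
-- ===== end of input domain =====

-- B replaces A's hash-dict counting with sort-then-run-length-encode per row and derives the output
-- width from the per-row results in a second pass (ragged rows padded to the longest) instead of A's
-- precomputed capped l_max with a preallocated board — a different grouping algorithm, same cost class.
-- Pre_ excludes exactly the inputs on which A raises IndexError (empty board, or a row shorter than row 0).

-- ===== PORT A =====
-- board[r] / board[r][c] with r,c from range(len(board)) / range(len(board[0])) are always in
-- range under Pre_cal_r, so pyGetD with a default is exact there; len()-values are Nats, so
-- Nat max/min are exact for l_max.
def cal_r (board : List (List Int)) : List (List Int) :=
  let br : Int := PySem.List.len board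
  let bc : Int := PySem.List.len (PySem.List.pyGetD board 0 [])
  -- first loop: builds new_dic_list and the running l_max (one pair accumulator)
  let st := (PySem.List.pyRange 0 br).foldl
    (fun (st : List (PySem.Dict Int Int) × Nat) r =>
      let row := PySem.List.pyGetD board r []
      let d := (PySem.List.pyRange 0 bc).foldl
        (fun (d : PySem.Dict Int Int) c =>
          let x := PySem.List.pyGetD row c 0
          if x = 0 then d
          else if d.contains x = false then d.insert x 1
          else d.insert x (d.getD x 0 + 1))
        PySem.Dict.empty
      (st.1 ++ [d], max st.2 d.size))
    ([], 0)
  let dicts := st.1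
  let lmax := min 50 st.2
  let nb0 := (PySem.List.pyRange 0 br).map (fun _ => List.replicate (lmax * 2) (0 : Int))
  -- second loop; 'if i == 50: break' runs exactly the first 50 iterations of the enumerate: take 50
  (PySem.List.pyRange 0 br).foldl
    (fun nb r =>
      let nowDic := PySem.List.pyGetD dicts r PySem.Dict.empty
      ((PySem.List.enumerate (PySem.List.sorted2 nowDic.items (fun p => p.2) (fun p => p.1)) 0).take 50).foldl
        (fun nb q =>
          nb.set r.toNat
            (((PySem.List.pyGetD nb r []).set (q.1.toNat * 2) q.2.1).set (q.1.toNat * 2 + 1) q.2.2))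
        nb)
    nb0

-- ===== PORT B =====
-- rle: the python recursion 'i = 1; while i < len(xs) and xs[i] == xs[0]: i += 1' computes
-- 1 + the length of the leading run of xs[1:] equal to xs[0], and xs[i:] is the rest of the list
-- after that run — takeWhile / dropWhile are exactly that split.
def pvRle (xs : List Int) : List (Int × Int) :=
  match xs with
  | [] => []
  | x :: t => (x, (1 : Int) + (t.takeWhile (· == x)).length) :: pvRle (t.dropWhile (· == x))
termination_by xs.length
decreasing_by exact Nat.lt_succ_of_le (List.length_dropWhile_le _ _)

def pvFlatRow (cells : List Int) : List Int :=
  let pairs := pvRle (PySem.List.sorted (cells.filter (fun x => decide (x ≠ 0))) (fun x => x) false)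
  ((PySem.List.sorted2 pairs (fun p => p.2) (fun p => p.1)).take 50).flatMap (fun p => [p.1, p.2])

-- max(len(fr) for fr in rows): nonempty under Pre_cal_r, so the .getD 0 default is never used there
def cal_r_alt (board : List (List Int)) : List (List Int) :=
  let bc : Int := PySem.List.len (PySem.List.pyGetD board 0 [])
  let rows := board.map (fun row => pvFlatRow (PySem.List.slice row none (some bc)))
  let width := (PySem.List.max? (rows.map (fun fr => fr.length)) (fun x => x)).getD 0
  rows.map (fun fr => fr ++ List.replicate (width - fr.length) (0 : Int))

-- ===== PRECONDITION & SPEC =====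
-- exactly the inputs on which A returns: a nonempty board whose rows all have at least
-- len(board[0]) entries (otherwise board[0] or board[r][c] raises IndexError)
def Pre_cal_r (board : List (List Int)) : Prop :=
  board ≠ [] ∧ ∀ row ∈ board, (PySem.List.pyGetD board 0 []).length ≤ row.length
instance (board : List (List Int)) : Decidable (Pre_cal_r board) := by unfold Pre_cal_r; infer_instance
def pvWitness_cal_r : List (List Int) := [[1, 2], [2, 2]]

def Spec_cal_r (board : List (List Int)) (out : List (List Int)) : Prop := out = cal_r_alt board
instance (board : List (List Int)) (out : List (List Int)) : Decidable (Spec_cal_r board out) := by unfold Spec_cal_r; infer_instance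

-- ===== CLAIM (what is proved, stated in full; the proofs are below) =====
def Claim_equal_cal_r : Prop := ∀ (board : List (List Int)), Dom_cal_r board → Pre_cal_r board → Spec_cal_r board (cal_r board)

-- ===== LEMMAS AND PROOFS =====

-- A's two-branch counting step is the one-insert counter step
lemma pvStepEq (d : PySem.Dict Int Int) (x : Int) :
    (if x = 0 then d else if d.contains x = false then d.insert x 1 else d.insert x (d.getD x 0 + 1))
      = (if x ≠ 0 then d.insert x (d.getD x 0 + 1) else d) := by
  by_cases hx : x = 0
  · simp [hx]
  · by_cases hc : d.contains x = false
    · simp [hx, hc, PySem.Dict.getD_of_not_contains d 0 hc]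
    · simp [hx, hc]

-- an index loop over range(bc) reading row[c] is a fold over the first bc cells
lemma pvFoldIdx {β : Type} (row : List Int) (bc : Nat) (hbc : bc ≤ row.length)
    (f : β → Int → β) (init : β) :
    (PySem.List.pyRange 0 (bc : Int)).foldl (fun d c => f d (PySem.List.pyGetD row c 0)) init
      = (row.take bc).foldl f init := by
  have hlen : (row.take bc).length = bc := by simp [Nat.min_eq_left hbc]
  have h1 : (PySem.List.pyRange 0 (bc : Int)).foldl (fun d c => f d (PySem.List.pyGetD row c 0)) init
      = (PySem.List.pyRange 0 (bc : Int)).foldl (fun d c => f d (PySem.List.pyGetD (row.take bc) c 0)) init := by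
    apply PySem.List.foldl_congr_mem
    intro acc c hc
    rw [PySem.List.mem_pyRange_one] at hc
    obtain ⟨h0, hlt⟩ := hc
    obtain ⟨k, rfl⟩ : ∃ k : Nat, c = (k : Int) := ⟨c.toNat, (Int.toNat_of_nonneg h0).symm⟩
    have hk : k < bc := by exact_mod_cast hlt
    rw [PySem.List.pyGetD_natCast, PySem.List.pyGetD_natCast]
    congr 1
    rw [List.getD_eq_getElem?_getD, List.getD_eq_getElem?_getD, List.getElem?_take]
    simp [hk]
  rw [h1]
  have h2 := PySem.List.foldl_pyRange_zero_pyGetD' (row.take bc) 0 f init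
  rwa [hlen] at h2

-- enumerate commutes with take
lemma pvEnumTake {α : Type} (xs : List α) (n : Nat) (s : Int) :
    (PySem.List.enumerate xs s).take n = PySem.List.enumerate (xs.take n) s := by
  induction xs generalizing n s with
  | nil => simp [PySem.List.enumerate]
  | cons x t ih =>
      cases n with
      | zero => simp
      | succ m => simp [PySem.List.enumerate_cons, ih]

-- writing the enumerated pairs into a zero row appends the flattened pairs
lemma pvWriteRow (ps : List (Int × Int)) : ∀ (j m : Nat) (pre : List Int),
    pre.length = 2 * j → 2 * ps.length ≤ m →
    (PySem.List.enumerate ps (j : Int)).foldl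
        (fun row q => (row.set (q.1.toNat * 2) q.2.1).set (q.1.toNat * 2 + 1) q.2.2)
        (pre ++ List.replicate m 0)
      = pre ++ ps.flatMap (fun p => [p.1, p.2]) ++ List.replicate (m - 2 * ps.length) (0 : Int) := by
  induction ps with
  | nil => intro j m pre hpre hm; simp [PySem.List.enumerate]
  | cons p t ih =>
      intro j m pre hpre hm
      rw [PySem.List.enumerate_cons]
      simp only [List.foldl_cons]
      have hm2 : 2 ≤ m := by simp at hm; omega
      have hrep : List.replicate m (0 : Int) = 0 :: 0 :: List.replicate (m - 2) 0 := by
        rw [show m = (m - 2) + 1 + 1 by omega]; simp [List.replicate_succ]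
      have htn : (j : Int).toNat = j := Int.toNat_natCast j
      have hstep :
          ((pre ++ List.replicate m (0 : Int)).set ((j : Int).toNat * 2) p.1).set
              ((j : Int).toNat * 2 + 1) p.2
            = (pre ++ [p.1, p.2]) ++ List.replicate (m - 2) 0 := by
        rw [htn, hrep]
        rw [List.set_append_right _ _ (by omega), List.set_append_right _ _ (by omega)]
        rw [show j * 2 - pre.length = 0 by omega, show j * 2 + 1 - pre.length = 1 by omega]
        simp
      rw [hstep]
      have hcast : (j : Int) + 1 = ((j + 1 : Nat) : Int) := by push_cast; ring
      rw [hcast, ih (j + 1) (m - 2) (pre ++ [p.1, p.2]) (by simp [hpre]; omega) (by simp at hm ⊢; omega)]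
      simp only [List.flatMap_cons, List.length_cons]
      rw [show m - 2 - 2 * t.length = m - 2 * (t.length + 1) by omega]
      simp

-- a loop step that rewrites only slot k of the outer list collapses to one set
lemma pvSetFold {β : Type} (l : List β) (k : Nat) (g : List Int → β → List Int) :
    ∀ (nb : List (List Int)),
      l.foldl (fun nb q => nb.set k (g (nb.getD k []) q)) nb
        = nb.set k (l.foldl g (nb.getD k []) ) := by
  induction l with
  | nil =>
      intro nb
      simp only [List.foldl_nil]
      by_cases hk : k < nb.length
      · rw [List.getD_eq_getElem _ _ hk, List.set_getElem_self]
      · rw [List.set_eq_of_length_le (by omega)]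
  | cons q t ih =>
      intro nb
      simp only [List.foldl_cons]
      rw [ih]
      by_cases hk : k < nb.length
      · have h1 : ((nb.set k (g (nb.getD k []) q)).getD k []) = g (nb.getD k []) q := by
          rw [List.getD_eq_getElem _ _ (by simpa using hk)]
          exact List.getElem_set_self _
        rw [h1, List.set_set]
      · have hk' : nb.length ≤ k := Nat.le_of_not_lt hk
        simp [List.set_eq_of_length_le, hk']

-- the outer write loop over indices is a map over the zipped rows
lemma pvSetLoop {α : Type} (h : Nat → α → α) (d0 : α) :
    ∀ (cur pre : List α),
      (List.range' pre.length cur.length 1).foldl (fun nb i => nb.set i (h i (nb.getD i d0))) (pre ++ cur)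
        = pre ++ (cur.zipIdx pre.length).map (fun p => h p.2 p.1) := by
  intro cur
  induction cur with
  | nil => intro pre; simp
  | cons a t ih =>
      intro pre
      simp only [List.length_cons, List.range'_succ, List.foldl_cons, List.zipIdx_cons, List.map_cons]
      have hgd : (pre ++ a :: t).getD pre.length d0 = a := by
        rw [List.getD_append_right _ _ _ _ le_rfl]; simp
      have hset : (pre ++ a :: t).set pre.length (h pre.length a) = (pre ++ [h pre.length a]) ++ t := by
        rw [List.set_append_right _ _ le_rfl]; simp
      rw [hgd, hset]
      have hlen : pre.length + 1 = (pre ++ [h pre.length a]).length := by simp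
      rw [hlen, ih (pre ++ [h pre.length a])]
      simp

-- zipIdx of a constant list pairs the constant with each index
lemma pvRepZip {α : Type} (z : α) : ∀ (n j : Nat),
    (List.replicate n z).zipIdx j = (List.range' j n 1).map (fun i => (z, i)) := by
  intro n
  induction n with
  | zero => intro j; simp
  | succ m ih => intro j; simp [List.replicate_succ, List.range'_succ, List.zipIdx_cons, ih]

-- a foldl max over a list mapped through a max-distributing function
lemma pvMaxHom (h : Nat → Nat) (hh : ∀ a b, h (max a b) = max (h a) (h b)) :
    ∀ (l : List Nat) (a : Nat), (l.map h).foldl max (h a) = h (l.foldl max a) := by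
  intro l
  induction l with
  | nil => intro a; simp
  | cons x t ih => intro a; simp only [List.map_cons, List.foldl_cons, ← hh, ih]

def pvCnt (cells : List Int) : PySem.Dict Int Int :=
  cells.foldl (fun d x => if x ≠ 0 then d.insert x (d.getD x 0 + 1) else d) PySem.Dict.empty
def pvSrt (d : PySem.Dict Int Int) : List (Int × Int) :=
  PySem.List.sorted2 d.items (fun p => p.2) (fun p => p.1)
def pvFlat (d : PySem.Dict Int Int) : List Int :=
  ((pvSrt d).take 50).flatMap (fun p => [p.1, p.2])
def pvCanon (board : List (List Int)) : List (List Int) :=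
  let bc := (PySem.List.pyGetD board 0 []).length
  let w := 2 * min 50 ((board.map (fun row => (pvCnt (row.take bc)).size)).foldl max 0)
  board.map (fun row => pvFlat (pvCnt (row.take bc)) ++ List.replicate (w - (pvFlat (pvCnt (row.take bc))).length) 0)

lemma pvFlatLen (d : PySem.Dict Int Int) : (pvFlat d).length = 2 * min 50 d.size := by
  unfold pvFlat pvSrt
  rw [List.length_flatMap]
  have hlen : (PySem.List.sorted2 d.items (fun p => p.2) (fun p => p.1)).length = d.size :=
    (PySem.List.sorted2_perm d.items (fun p => p.2) (fun p => p.1) false).length_eq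
  have h2 : ∀ l : List (Int × Int), (l.map (fun p => ([p.1, p.2] : List Int).length)).sum = 2 * l.length := by
    intro l; induction l with
    | nil => simp
    | cons x t _ => simp; omega
  rw [h2, List.length_take, hlen]

-- ---- B-side: sort + run-length-encode produces the counter's items up to permutation ----

-- sorted2 by the keys (k1, k2) is sorted by the lexicographic pair key
lemma pvSorted2AsLex {α : Type} (xs : List α) (k1 k2 : α → Int) :
    PySem.List.sorted2 xs k1 k2 false
      = PySem.List.sorted xs (fun x => toLex (k1 x, k2 x)) false := by
  rw [PySem.List.sorted_eq_foldl_insertBy]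
  show xs.foldl (fun acc x => PySem.List.insertBy _ x acc) [] = _
  congr 1
  funext acc x
  congr 1
  funext a b
  have h : (toLex (k1 a, k2 a) < toLex (k1 b, k2 b)) ↔ (k1 a < k1 b ∨ (k1 a = k1 b ∧ k2 a < k2 b)) :=
    Prod.Lex.toLex_lt_toLex
  rcases lt_trichotomy (k1 a) (k1 b) with hlt | heq | hgt
  · simp [h, hlt, not_lt_of_gt hlt]
  · simp [heq, Prod.Lex.toLex_lt_toLex]
  · simp [h, hgt, not_lt_of_gt hgt, ne_of_gt hgt]

-- prepending a fresh element commutes with the Set.add fold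
lemma pvAddFoldCons (x : Int) : ∀ (m s : List Int), x ∉ m →
    m.foldl PySem.Set.add (x :: s) = x :: m.foldl PySem.Set.add s := by
  intro m
  induction m with
  | nil => intro s _; rfl
  | cons a t ih =>
      intro s hx
      have hax : a ≠ x := by intro h; exact hx (h ▸ List.mem_cons_self)
      have hstep : PySem.Set.add (x :: s) a = x :: PySem.Set.add s a := by
        have hcx : ((x :: s).contains a) = s.contains a := by
          rw [List.contains_cons, show (a == x) = false by simpa using hax, Bool.false_or]
        simp only [PySem.Set.add, PySem.Set.contains, hcx]
        split_ifs <;> simp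
      simp only [List.foldl_cons, hstep]
      exact ih _ (fun h => hx (List.mem_cons_of_mem _ h))

-- run-length encoding of a ≤-sorted list lists each distinct value with its count
lemma pvRleSorted : ∀ (l : List Int), l.Pairwise (· ≤ ·) →
    pvRle l = (PySem.Set.ofList l).map (fun k => (k, (l.count k : Int))) := by
  intro l
  induction l using pvRle.induct with
  | case1 => intro _; simp [pvRle]
  | case2 x t ih =>
      intro hp
      have hsplit : t = t.takeWhile (· == x) ++ t.dropWhile (· == x) := (List.takeWhile_append_dropWhile).symm
      set run := t.takeWhile (· == x) with hrun
      set rest := t.dropWhile (· == x) with hrest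
      have hrunx : ∀ y ∈ run, y = x := by
        intro y hy
        have := List.mem_takeWhile_imp hy
        simpa using this
      -- x ∉ rest: the first element of rest is ≠ x and ≥ x, and rest is ≤-sorted
      have hle : ∀ y ∈ t, x ≤ y := by
        intro y hy; exact (List.pairwise_cons.mp hp).1 y hy
      have hpt : t.Pairwise (· ≤ ·) := (List.pairwise_cons.mp hp).2
      have hprest : rest.Pairwise (· ≤ ·) := hpt.sublist (hsplit ▸ List.sublist_append_right run rest)
      have hxrest : x ∉ rest := by
        cases hr : rest with
        | nil => simp
        | cons y r' =>
            have hy_ne : ¬ (y == x) = true := by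
              have := List.head?_dropWhile_not (· == x) t
              rw [← hrest, hr] at this; simpa using this
            have hyx : y ≠ x := by simpa using hy_ne
            have hymem : y ∈ t := hsplit ▸ (List.mem_append_right run (hr ▸ List.mem_cons_self))
            have hxy : x < y := lt_of_le_of_ne (hle y hymem) (Ne.symm hyx)
            intro hmem
            rcases List.mem_cons.mp hmem with h | h
            · exact hyx h.symm
            · have : y ≤ x := by
                have := (List.pairwise_cons.mp (hr ▸ hprest)).1 x h
                exact this
              exact absurd hxy (not_lt_of_ge this)
      -- counts
      have hcount_run : run.count x = run.length :=
        List.count_eq_length.mpr (fun y hy => by rw [hrunx y hy])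
      have hcount_rest_x : rest.count x = 0 := List.count_eq_zero.mpr hxrest
      have hcx : (x :: t).count x = run.length + 1 := by
        rw [List.count_cons_self]
        conv_lhs => rw [hsplit]
        rw [List.count_append, hcount_run, hcount_rest_x]
      -- the set: ofList (x :: t) = x :: ofList rest
      have hset : PySem.Set.ofList (x :: t) = x :: PySem.Set.ofList rest := by
        show (x :: t).foldl PySem.Set.add [] = _
        rw [List.foldl_cons]
        have hadd : PySem.Set.add [] x = [x] := rfl
        rw [hadd]
        conv_lhs => rw [hsplit]
        rw [List.foldl_append]
        have hrunfold : run.foldl PySem.Set.add [x] = [x] := by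
          have : ∀ (r : List Int), (∀ y ∈ r, y = x) → r.foldl PySem.Set.add [x] = [x] := by
            intro r
            induction r with
            | nil => intro _; rfl
            | cons a t' ih' =>
                intro h
                have ha : a = x := h a List.mem_cons_self
                simp only [List.foldl_cons, ha]
                have : PySem.Set.add [x] x = [x] := by
                  simp [PySem.Set.add, PySem.Set.contains]
                rw [this]
                exact ih' (fun y hy => h y (List.mem_cons_of_mem _ hy))
          exact this run hrunx
        rw [hrunfold]
        exact pvAddFoldCons x rest [] hxrest
      rw [pvRle]
      rw [hset, List.map_cons]
      have hk_rest : ∀ k ∈ PySem.Set.ofList rest, (x :: t).count k = rest.count k := by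
        intro k hk
        have hkrest : k ∈ rest := (PySem.Set.mem_ofList rest k).mp hk
        have hkx : k ≠ x := fun h => hxrest (h ▸ hkrest)
        rw [show (x :: t) = (x :: run) ++ rest from by rw [hsplit, List.cons_append]]
        rw [List.count_append]
        have h0 : List.count k (x :: run) = 0 := by
          rw [List.count_eq_zero]
          intro hmem
          rcases List.mem_cons.mp hmem with h | h
          · exact hkx h
          · exact hkx (hrunx k h)
        omega
      rw [ih hprest]
      congr 1
      · rw [hcx, ← hrun]
        simp only [Prod.mk.injEq, true_and]
        push_cast
        ring
      · exact (List.map_congr_left (fun k hk => by rw [hk_rest k hk])).symm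

-- the two per-row pair lists are permutations of each other
lemma pvPairsPerm (cells : List Int) :
    (pvRle (PySem.List.sorted (cells.filter (fun x => decide (x ≠ 0))) (fun x => x) false)).Perm
      (pvCnt cells).items := by
  set nz := cells.filter (fun x => decide (x ≠ 0)) with hnz
  set snz := PySem.List.sorted nz (fun x => x) false with hsnz
  have hperm : snz.Perm nz := PySem.List.sorted_perm nz (fun x => x) false
  -- A side: pvCnt cells = counter nz
  have hcnt : pvCnt cells = PySem.Dict.counter nz := by
    unfold pvCnt
    rw [PySem.List.foldl_ite_eq_foldl_filter]
    exact PySem.Dict.foldl_insert_getD_add_one_eq_counter nz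
  rw [hcnt, PySem.Dict.items_counter]
  -- B side: rle of the sorted list
  have hpw : snz.Pairwise (· ≤ ·) := by
    have := PySem.List.sorted_pairwise nz (fun x => x)
    simpa using this
  rw [pvRleSorted snz hpw]
  -- counts agree along the permutation
  have hcounts : ∀ k, snz.count k = nz.count k := fun k => hperm.count_eq k
  rw [List.map_congr_left (fun k _ => by rw [hcounts k])]
  -- the two first-occurrence sets are permutations: both Nodup with equal membership
  refine List.Perm.map _ ?_
  rw [List.perm_ext_iff_of_nodup (PySem.Set.nodup_ofList snz) (PySem.Set.nodup_ofList nz)]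
  intro a
  rw [PySem.Set.mem_ofList, PySem.Set.mem_ofList]
  constructor
  · intro h; exact hperm.mem_iff.mp h
  · intro h; exact hperm.mem_iff.mpr h

-- hence the sorted pair lists coincide: the key (count, value) is injective on pairs
lemma pvFlatRowEq (cells : List Int) : pvFlatRow cells = pvFlat (pvCnt cells) := by
  unfold pvFlatRow pvFlat pvSrt
  have hinj : Function.Injective (fun p : Int × Int => toLex (p.2, p.1)) := by
    intro p q h
    have := toLex.injective h
    exact Prod.ext (congrArg Prod.snd this) (congrArg Prod.fst this)
  show List.flatMap (fun p => [p.1, p.2])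
      (List.take 50 (PySem.List.sorted2
        (pvRle (PySem.List.sorted (cells.filter (fun x => decide (x ≠ 0))) (fun x => x) false))
        (fun p => p.2) (fun p => p.1) false))
    = List.flatMap (fun p => [p.1, p.2])
      (List.take 50 (PySem.List.sorted2 (pvCnt cells).items (fun p => p.2) (fun p => p.1) false))
  rw [pvSorted2AsLex, pvSorted2AsLex,
      PySem.List.sorted_eq_sorted_of_perm _ _ _ hinj (pvPairsPerm cells)]

lemma pvBeq (board : List (List Int)) (hne : board ≠ []) : cal_r_alt board = pvCanon board := by
  obtain ⟨b0, rest, rfl⟩ : ∃ b0 rest, board = b0 :: rest := by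
    cases board with
    | nil => exact absurd rfl hne
    | cons b0 rest => exact ⟨b0, rest, rfl⟩
  unfold cal_r_alt pvCanon
  simp only [PySem.List.len_eq, PySem.List.slice_to_natCast]
  set bc := (PySem.List.pyGetD (b0 :: rest) 0 []).length with hbc
  simp only [pvFlatRowEq]
  have hw : (PySem.List.max? (List.map (fun fr => fr.length) (List.map (fun row => pvFlat (pvCnt (List.take bc row))) (b0 :: rest))) (fun x => x)).getD 0
      = 2 * min 50 (List.foldl max 0 (List.map (fun row => (pvCnt (List.take bc row)).size) (b0 :: rest))) := by
    rw [List.map_map]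
    have hcomp : ((fun fr : List Int => fr.length) ∘ (fun row => pvFlat (pvCnt (List.take bc row))))
        = (fun x => 2 * min 50 x) ∘ (fun row => (pvCnt (List.take bc row)).size) := by
      funext row; simp [Function.comp, pvFlatLen]
    rw [hcomp, ← List.map_map]
    simp only [List.map_cons, PySem.List.max?_id_cons, Option.getD_some, List.foldl_cons, Nat.zero_max]
    rw [pvMaxHom (fun x => 2 * min 50 x) (by intro a b; show 2 * min 50 (max a b) = max (2 * min 50 a) (2 * min 50 b); omega)]
  rw [hw, List.map_map]
  rfl

lemma pvAeq (board : List (List Int))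
    (hrows : ∀ row ∈ board, (PySem.List.pyGetD board 0 []).length ≤ row.length) :
    cal_r board = pvCanon board := by
  unfold cal_r pvCanon
  simp only [PySem.List.len_eq]
  set bc := (PySem.List.pyGetD board 0 []).length with hbc
  -- the inner counting loop equals pvCnt of the first bc cells
  have hAF : ∀ row ∈ board,
      (PySem.List.pyRange 0 (bc : Int)).foldl
        (fun (d : PySem.Dict Int Int) c =>
          if PySem.List.pyGetD row c 0 = 0 then d
          else if d.contains (PySem.List.pyGetD row c 0) = false then
            d.insert (PySem.List.pyGetD row c 0) 1
          else d.insert (PySem.List.pyGetD row c 0) (d.getD (PySem.List.pyGetD row c 0) 0 + 1))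
        PySem.Dict.empty = pvCnt (row.take bc) := by
    intro row hrow
    refine Eq.trans (pvFoldIdx row bc (hrows row hrow)
      (fun (d : PySem.Dict Int Int) (x : Int) => if x = 0 then d else if d.contains x = false then d.insert x 1
        else d.insert x (d.getD x 0 + 1)) PySem.Dict.empty) ?_
    exact PySem.List.foldl_congr_mem _ _ _ _ (fun acc x _ => pvStepEq acc x)
  -- the first loop is a pair of folds over the board
  rw [PySem.List.foldl_pyRange_zero_pyGetD' board []
    (fun (st : List (PySem.Dict Int Int) × Nat) row =>
      (st.1 ++ [(PySem.List.pyRange 0 (bc : Int)).foldl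
        (fun (d : PySem.Dict Int Int) c =>
          if PySem.List.pyGetD row c 0 = 0 then d
          else if d.contains (PySem.List.pyGetD row c 0) = false then
            d.insert (PySem.List.pyGetD row c 0) 1
          else d.insert (PySem.List.pyGetD row c 0) (d.getD (PySem.List.pyGetD row c 0) 0 + 1))
        PySem.Dict.empty],
       max st.2 ((PySem.List.pyRange 0 (bc : Int)).foldl
        (fun (d : PySem.Dict Int Int) c =>
          if PySem.List.pyGetD row c 0 = 0 then d
          else if d.contains (PySem.List.pyGetD row c 0) = false then
            d.insert (PySem.List.pyGetD row c 0) 1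
          else d.insert (PySem.List.pyGetD row c 0) (d.getD (PySem.List.pyGetD row c 0) 0 + 1))
        PySem.Dict.empty).size)) ([], 0)]
  rw [PySem.List.foldl_prod_mk
    (f := fun (s : List (PySem.Dict Int Int)) (row : List Int) =>
      s ++ [(PySem.List.pyRange 0 (bc : Int)).foldl
        (fun (d : PySem.Dict Int Int) c =>
          if PySem.List.pyGetD row c 0 = 0 then d
          else if d.contains (PySem.List.pyGetD row c 0) = false then
            d.insert (PySem.List.pyGetD row c 0) 1
          else d.insert (PySem.List.pyGetD row c 0) (d.getD (PySem.List.pyGetD row c 0) 0 + 1))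
        PySem.Dict.empty])
    (g := fun (s : Nat) (row : List Int) =>
      max s ((PySem.List.pyRange 0 (bc : Int)).foldl
        (fun (d : PySem.Dict Int Int) c =>
          if PySem.List.pyGetD row c 0 = 0 then d
          else if d.contains (PySem.List.pyGetD row c 0) = false then
            d.insert (PySem.List.pyGetD row c 0) 1
          else d.insert (PySem.List.pyGetD row c 0) (d.getD (PySem.List.pyGetD row c 0) 0 + 1))
        PySem.Dict.empty).size)]
  simp only [PySem.List.foldl_append_singleton_eq_map, List.nil_append]
  rw [List.map_congr_left hAF]
  rw [PySem.List.foldl_congr_mem board _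
    (fun (s : Nat) (row : List Int) => max s (pvCnt (row.take bc)).size) 0
    (fun acc row hrow => by rw [hAF row hrow])]
  simp only [List.foldl_map]
  rw [PySem.List.pyRange_one 0 (board.length : Int)]
  simp only [zero_add, Int.sub_zero, Int.toNat_natCast, List.map_map, List.foldl_map,
    Function.comp_def, PySem.List.pyGetD_natCast]
  -- collapse the repeated writes to row r into one set per iteration
  rw [PySem.List.foldl_congr_mem (List.range board.length) _
    (fun (x : List (List Int)) (y : Nat) => x.set y
      ((List.take 50 (PySem.List.enumerate
          (PySem.List.sorted2 ((List.map (fun a => pvCnt (List.take bc a)) board).getD y PySem.Dict.empty).items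
            (fun p => p.2) (fun p => p.1)) 0)).foldl
        (fun row (q : Int × Int × Int) => (row.set (q.1.toNat * 2) q.2.1).set (q.1.toNat * 2 + 1) q.2.2)
        (x.getD y []))) _
    (fun x y _ => pvSetFold _ y _ x)]
  rw [List.range_eq_range']
  have hsl := pvSetLoop (fun (i : Nat) (row : List Int) =>
      (List.take 50 (PySem.List.enumerate
          (PySem.List.sorted2 ((List.map (fun a => pvCnt (List.take bc a)) board).getD i PySem.Dict.empty).items
            (fun p => p.2) (fun p => p.1)) 0)).foldl
        (fun row (q : Int × Int × Int) => (row.set (q.1.toNat * 2) q.2.1).set (q.1.toNat * 2 + 1) q.2.2) row)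
    ([] : List Int)
    (List.replicate board.length
      (List.replicate (min 50 (List.foldl (fun s row => max s (pvCnt (List.take bc row)).size) 0 board) * 2) (0 : Int)))
    ([] : List (List Int))
  simp only [List.nil_append, List.length_nil, List.length_replicate] at hsl
  have hnb0 : (List.range' 0 board.length).map
      (fun _ => List.replicate (min 50 (List.foldl (fun s row => max s (pvCnt (List.take bc row)).size) 0 board) * 2) (0 : Int))
      = List.replicate board.length
        (List.replicate (min 50 (List.foldl (fun s row => max s (pvCnt (List.take bc row)).size) 0 board) * 2) (0 : Int)) := by
    rw [List.eq_replicate_iff]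
    exact ⟨by simp, by intro b hb; rcases List.mem_map.mp hb with ⟨a, _, rfl⟩; rfl⟩
  rw [hnb0, hsl, pvRepZip _ board.length 0, List.map_map]
  apply List.ext_getElem (by simp)
  intro i hi1 hi2
  have hi : i < board.length := by simpa using hi2
  simp only [List.getElem_map, Function.comp_apply, List.getElem_range', zero_add, one_mul]
  have hds : (List.map (fun a => pvCnt (List.take bc a)) board).getD i PySem.Dict.empty
      = pvCnt (List.take bc board[i]) := by
    rw [List.getD_eq_getElem _ _ (by simpa using hi)]
    simp
  rw [hds]
  have hsz : (pvCnt (List.take bc board[i])).size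
      ≤ List.foldl (fun s row => max s (pvCnt (List.take bc row)).size) 0 board :=
    (PySem.List.le_foldl_max_nat board (fun row => (pvCnt (List.take bc row)).size) 0).2 _
      (List.getElem_mem hi)
  have hlen : (PySem.List.sorted2 (pvCnt (List.take bc board[i])).items
      (fun p => p.2) (fun p : Int × Int => p.1)).length = (pvCnt (List.take bc board[i])).size := by
    rw [(PySem.List.sorted2_perm (pvCnt (List.take bc board[i])).items _ _ false).length_eq]
    rfl
  rw [pvEnumTake]
  have hwr := pvWriteRow
    ((PySem.List.sorted2 (pvCnt (List.take bc board[i])).items (fun p => p.2) (fun p => p.1)).take 50)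
    0 (min 50 (List.foldl (fun s row => max s (pvCnt (List.take bc row)).size) 0 board) * 2) []
    (by simp) (by rw [List.length_take, hlen]; omega)
  simp only [Nat.cast_zero, List.nil_append] at hwr
  rw [hwr, pvFlatLen]
  unfold pvFlat pvSrt
  congr 1
  rw [show (List.take 50 (PySem.List.sorted2 (pvCnt (List.take bc board[i])).items
      (fun p => p.2) (fun p => p.1))).length = min 50 (pvCnt (List.take bc board[i])).size by
    rw [List.length_take, hlen]]
  congr 1
  omega

-- ===== VERDICT =====
theorem cal_r_spec : Claim_equal_cal_r := by
  intro board _ hpre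
  obtain ⟨hne, hrows⟩ := hpre
  unfold Spec_cal_r
  rw [pvAeq board hrows, pvBeq board hne]
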